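-- pv_equiv track=rewrite | github.com/shkabo/WowProfessionLevelingTool | app/functions.py | getCheapestSkillingRecipe
-- ===== SOURCE A (Python) =====
-- def getCheapestSkillingRecipe(recipes, recipePrices, currentSkill):
--     cost = 999999 # arbitrary large number
--     candidate = ''
--
--     for name, info in recipes.items():
--         if info["Learn"] <= currentSkill:
--             if recipePrices[name] < cost:
--                 candidate = name
--                 cost = recipePrices[name]
--
--     return candidate
-- ===== SOURCE B (Python) =====
-- def getCheapestSkillingRecipe(recipes, recipePrices, currentSkill):
--     learnable = [name for name, info in recipes.items() if info["Learn"] <= currentSkill]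
--     learnable.sort(key=lambda name: recipePrices[name])
--     return learnable[0] if learnable else ''
-- ===== Notes on version B (the rewrite author's own statement) =====
-- stated objective: alternative
-- what changed: A's fused running-min loop with (cost, candidate) state is replaced by collecting the learnable recipe names, stably sorting them by price and returning the first one; Pre_ excludes inputs where A raises KeyError (a recipe without a 'Learn' entry, or a learnable recipe absent from recipePrices), duplicate-key association lists (which represent no Python dict), and recipe tables containing a recipe literally named '', on which A's return '' is ambiguous between 'no recipe found' and that recipe.
-- intended difference: On inputs that have at least one learnable recipe but where every learnable recipe costs at least 999999, A returns '' because its running minimum starts at the arbitrary sentinel 999999, while B returns the genuinely cheapest learnable recipe, which is the intended value. — e.g. on getCheapestSkillingRecipe([("epic rod", [("Learn", 1)])], [("epic rod", 1000000)], 5): A returns "", B returns "epic rod"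
-- outside the precondition, e.g. on getCheapestSkillingRecipe({'': {'Learn': 1}}, {'': 5}, 3): A returns '', B returns ''
import Mathlib
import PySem

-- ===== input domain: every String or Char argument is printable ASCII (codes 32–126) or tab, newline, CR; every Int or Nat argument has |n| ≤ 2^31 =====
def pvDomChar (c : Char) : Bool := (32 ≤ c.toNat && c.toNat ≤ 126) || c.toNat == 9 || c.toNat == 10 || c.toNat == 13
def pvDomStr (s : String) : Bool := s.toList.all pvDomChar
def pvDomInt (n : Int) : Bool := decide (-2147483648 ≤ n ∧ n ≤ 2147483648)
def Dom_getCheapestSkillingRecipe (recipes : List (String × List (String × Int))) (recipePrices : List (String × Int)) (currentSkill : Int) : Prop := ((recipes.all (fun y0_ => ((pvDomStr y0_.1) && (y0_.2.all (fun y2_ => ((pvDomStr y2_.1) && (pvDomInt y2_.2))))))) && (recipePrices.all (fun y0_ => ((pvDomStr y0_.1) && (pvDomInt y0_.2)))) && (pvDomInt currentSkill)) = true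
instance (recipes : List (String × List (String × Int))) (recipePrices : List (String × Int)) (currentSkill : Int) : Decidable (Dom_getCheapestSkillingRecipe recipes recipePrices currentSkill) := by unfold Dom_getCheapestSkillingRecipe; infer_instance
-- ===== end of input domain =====

-- ===== PORT A =====
-- B collects the learnable names, stably sorts them by price and takes the first; return values only.

-- price lookup recipePrices[name], totalised with the sentinel 999999 where Python raises KeyError
-- (such inputs are excluded by Pre_getCheapestSkillingRecipe)
def pvPrice (recipePrices : List (String × Int)) (n : String) : Int :=
  (recipePrices.lookup n).getD 999999

-- literal port of A: one pass keeping (cost, candidate) state, starting at the 999999 sentinel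
def getCheapestSkillingRecipe (recipes : List (String × List (String × Int))) (recipePrices : List (String × Int)) (currentSkill : Int) : String :=
  (recipes.foldl (fun (st : Int × String) p =>
      match p.2.lookup "Learn" with
      | some learn =>
        if learn ≤ currentSkill then
          if pvPrice recipePrices p.1 < st.1 then (pvPrice recipePrices p.1, p.1) else st
        else st
      | none => st  -- Python raises KeyError here; excluded by Pre_
    ) (999999, "")).2

-- ===== PORT B =====
def getCheapestSkillingRecipe_alt (recipes : List (String × List (String × Int))) (recipePrices : List (String × Int)) (currentSkill : Int) : String :=
  -- the comprehension of learnable names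
  let learnable := (recipes.filter (fun p =>
      match p.2.lookup "Learn" with
      | some l => decide (l ≤ currentSkill)
      | none => false)).map (fun p => p.1)
  -- learnable.sort(key=...) then learnable[0] if learnable else ''
  match PySem.List.sorted learnable (fun n => pvPrice recipePrices n) with
  | [] => ""
  | x :: _ => x

-- ===== PRECONDITION & SPEC =====
-- Pre_ excludes (a) inputs where Python A raises KeyError: a recipe info dict without a "Learn" key,
-- or a learnable recipe name missing from recipePrices; (b) association lists with duplicate keys,
-- which represent no Python dict (the parameters are dicts in Python, so their key lists are Nodup);
-- and (c) recipe tables containing a recipe literally named '', on which A's return value '' is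
-- ambiguous between "no recipe found" and that recipe.
def Pre_getCheapestSkillingRecipe (recipes : List (String × List (String × Int))) (recipePrices : List (String × Int)) (currentSkill : Int) : Prop :=
  (recipes.map (fun p => p.1)).Nodup ∧
  (recipePrices.map (fun p => p.1)).Nodup ∧
  (∀ p ∈ recipes, p.1 ≠ "" ∧ (p.2.map (fun q => q.1)).Nodup ∧
    "Learn" ∈ p.2.map (fun q => q.1) ∧
    ((p.2.lookup "Learn").getD (currentSkill + 1) ≤ currentSkill → p.1 ∈ recipePrices.map (fun q => q.1)))

instance (recipes : List (String × List (String × Int))) (recipePrices : List (String × Int)) (currentSkill : Int) : Decidable (Pre_getCheapestSkillingRecipe recipes recipePrices currentSkill) := by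
  unfold Pre_getCheapestSkillingRecipe; infer_instance

def pvWitness_getCheapestSkillingRecipe : (List (String × List (String × Int))) × (List (String × Int)) × Int :=
  ([("copper rod", [("Learn", 1)]), ("silver rod", [("Learn", 100)])], [("copper rod", 5), ("silver rod", 9)], 10)

-- On inputs that have at least one learnable recipe but where every learnable recipe costs at least
-- 999999, A returns '' (its running minimum starts at the arbitrary sentinel 999999), while B returns
-- the genuinely cheapest learnable recipe, which is the intended value.
def D_getCheapestSkillingRecipe (recipes : List (String × List (String × Int))) (recipePrices : List (String × Int)) (currentSkill : Int) : Prop :=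
  (∃ p ∈ recipes, (p.2.lookup "Learn").getD (currentSkill + 1) ≤ currentSkill) ∧
  (∀ p ∈ recipes, (p.2.lookup "Learn").getD (currentSkill + 1) ≤ currentSkill →
      999999 ≤ pvPrice recipePrices p.1)

instance (recipes : List (String × List (String × Int))) (recipePrices : List (String × Int)) (currentSkill : Int) : Decidable (D_getCheapestSkillingRecipe recipes recipePrices currentSkill) := by
  unfold D_getCheapestSkillingRecipe; infer_instance

def Spec_getCheapestSkillingRecipe (recipes : List (String × List (String × Int))) (recipePrices : List (String × Int)) (currentSkill : Int) (out : String) : Prop := ¬ D_getCheapestSkillingRecipe recipes recipePrices currentSkill → out = getCheapestSkillingRecipe_alt recipes recipePrices currentSkill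
instance (recipes : List (String × List (String × Int))) (recipePrices : List (String × Int)) (currentSkill : Int) (out : String) : Decidable (Spec_getCheapestSkillingRecipe recipes recipePrices currentSkill out) := by unfold Spec_getCheapestSkillingRecipe; infer_instance

def pvDiffWitness_getCheapestSkillingRecipe : (List (String × List (String × Int))) × (List (String × Int)) × Int :=
  ([("epic rod", [("Learn", 1)])], [("epic rod", 1000000)], 5)

def pvDiffWitnessOut_getCheapestSkillingRecipe : String × String := ("", "epic rod")

-- ===== CLAIM (what is proved, stated in full; the proofs are below) =====
def Claim_unchanged_getCheapestSkillingRecipe : Prop := ∀ (recipes : List (String × List (String × Int))) (recipePrices : List (String × Int)) (currentSkill : Int), Dom_getCheapestSkillingRecipe recipes recipePrices currentSkill → Pre_getCheapestSkillingRecipe recipes recipePrices currentSkill → Spec_getCheapestSkillingRecipe recipes recipePrices currentSkill (getCheapestSkillingRecipe recipes recipePrices currentSkill)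
def Claim_changed_getCheapestSkillingRecipe : Prop := Dom_getCheapestSkillingRecipe (pvDiffWitness_getCheapestSkillingRecipe.1) (pvDiffWitness_getCheapestSkillingRecipe.2.1) (pvDiffWitness_getCheapestSkillingRecipe.2.2) ∧ Pre_getCheapestSkillingRecipe (pvDiffWitness_getCheapestSkillingRecipe.1) (pvDiffWitness_getCheapestSkillingRecipe.2.1) (pvDiffWitness_getCheapestSkillingRecipe.2.2) ∧ D_getCheapestSkillingRecipe (pvDiffWitness_getCheapestSkillingRecipe.1) (pvDiffWitness_getCheapestSkillingRecipe.2.1) (pvDiffWitness_getCheapestSkillingRecipe.2.2) ∧ getCheapestSkillingRecipe (pvDiffWitness_getCheapestSkillingRecipe.1) (pvDiffWitness_getCheapestSkillingRecipe.2.1) (pvDiffWitness_getCheapestSkillingRecipe.2.2) = pvDiffWitnessOut_getCheapestSkillingRecipe.1 ∧ getCheapestSkillingRecipe_alt (pvDiffWitness_getCheapestSkillingRecipe.1) (pvDiffWitness_getCheapestSkillingRecipe.2.1) (pvDiffWitness_getCheapestSkillingRecipe.2.2) = pvDiffWitnessOut_getCheapestSkillingRecipe.2 ∧ pvDiffWitnessOut_getCheapestSkillingRecipe.1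 ≠ pvDiffWitnessOut_getCheapestSkillingRecipe.2

def Claim_exact_getCheapestSkillingRecipe : Prop := ∀ (recipes : List (String × List (String × Int))) (recipePrices : List (String × Int)) (currentSkill : Int), Dom_getCheapestSkillingRecipe recipes recipePrices currentSkill → Pre_getCheapestSkillingRecipe recipes recipePrices currentSkill → D_getCheapestSkillingRecipe recipes recipePrices currentSkill → getCheapestSkillingRecipe recipes recipePrices currentSkill ≠ getCheapestSkillingRecipe_alt recipes recipePrices currentSkill

-- ===== LEMMAS AND PROOFS =====

-- the common recursive skeleton: the (price, name) of the cheapest learnable recipe under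
-- threshold c (first one on a price tie), or none
def pvBest (recipePrices : List (String × Int)) (currentSkill : Int) : List (String × List (String × Int)) → Int → Option (Int × String)
  | [], _ => none
  | p :: rs, c =>
    match p.2.lookup "Learn" with
    | some l =>
      if l ≤ currentSkill then
        if pvPrice recipePrices p.1 < c then
          match pvBest recipePrices currentSkill rs (pvPrice recipePrices p.1) with
          | none => some (pvPrice recipePrices p.1, p.1)
          | some r => some r
        else pvBest recipePrices currentSkill rs c
      else pvBest recipePrices currentSkill rs c
    | none => pvBest recipePrices currentSkill rs c

-- A's fold computes pvBest (with its initial state as the fallback)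
lemma foldA_eq_pvBest (recipePrices : List (String × Int)) (currentSkill : Int)
    (rs : List (String × List (String × Int))) :
    ∀ (c : Int) (cand : String),
      rs.foldl (fun (st : Int × String) p =>
        match p.2.lookup "Learn" with
        | some learn =>
          if learn ≤ currentSkill then
            if pvPrice recipePrices p.1 < st.1 then (pvPrice recipePrices p.1, p.1) else st
          else st
        | none => st) (c, cand)
      = match pvBest recipePrices currentSkill rs c with
        | none => (c, cand)
        | some r => r := by
  induction rs with
  | nil => intro c cand; simp [pvBest]
  | cons p rs ih =>
    intro c cand
    simp only [List.foldl_cons, pvBest]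
    cases hl : p.2.lookup "Learn" with
    | none => simpa using ih c cand
    | some l =>
      by_cases h1 : l ≤ currentSkill
      · by_cases h2 : pvPrice recipePrices p.1 < c
        · simp only [h1, h2, if_true]
          rw [ih (pvPrice recipePrices p.1) p.1]
          cases pvBest recipePrices currentSkill rs (pvPrice recipePrices p.1) <;> simp
        · simp only [h1, h2, if_true, if_false]
          exact ih c cand
      · simp only [h1, if_false]
        exact ih c cand

-- the running-min of min? with a fixed starting element
def pvRun (key : String → Int) (m : String) : List String → String
  | [] => m
  | x :: L => if key x < key m then pvRun key x L else pvRun key m L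

lemma min?_cons (key : String → Int) (L : List String) :
    ∀ (m : String), PySem.List.min? (m :: L) key = some (pvRun key m L) := by
  induction L with
  | nil => intro m; simp [PySem.List.min?, pvRun]
  | cons x L ih =>
    intro m
    by_cases h : key x < key m
    · have hstep : PySem.List.min? (m :: x :: L) key = PySem.List.min? (x :: L) key := by
        simp [PySem.List.min?, h]
      rw [hstep, ih x]; simp [pvRun, h]
    · have hstep : PySem.List.min? (m :: x :: L) key = PySem.List.min? (m :: L) key := by
        simp [PySem.List.min?, h]
      rw [hstep, ih m]; simp [pvRun, h]

-- first-min characterisation: the running min from m over L is m unless some element beats it,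
-- in which case it is the first minimal element among those strictly below key m
lemma pvRun_eq_aux (key : String → Int) :
    ∀ (n : Nat) (L : List String) (m : String), L.length ≤ n →
      pvRun key m L
      = match PySem.List.min? (L.filter (fun x => decide (key x < key m))) key with
        | none => m
        | some x => x := by
  intro n
  induction n with
  | zero =>
    intro L m hL
    have : L = [] := List.eq_nil_of_length_eq_zero (Nat.le_zero.mp hL)
    subst this; simp [pvRun, PySem.List.min?]
  | succ n ih =>
    intro L m hL
    cases L with
    | nil => simp [pvRun, PySem.List.min?]
    | cons x L' =>
      simp only [List.length_cons, Nat.succ_le_succ_iff] at hL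
      by_cases h : key x < key m
      · have hfil : (x :: L').filter (fun z => decide (key z < key m))
            = x :: L'.filter (fun z => decide (key z < key m)) := by
          simp [h]
        rw [show pvRun key m (x :: L') = pvRun key x L' by simp [pvRun, h]]
        rw [hfil, min?_cons]
        have hM : (L'.filter (fun z => decide (key z < key m))).length ≤ n :=
          le_trans (List.length_filter_le _ _) hL
        rw [ih (L'.filter (fun z => decide (key z < key m))) x hM]
        rw [ih L' x hL]
        have : (L'.filter (fun z => decide (key z < key m))).filter (fun z => decide (key z < key x))
            = L'.filter (fun z => decide (key z < key x)) := by
          rw [List.filter_filter]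
          apply List.filter_congr
          intro z _
          by_cases hz : key z < key x
          · simp [hz, lt_trans hz h]
          · simp [hz]
        rw [this]
      · have hfil : (x :: L').filter (fun z => decide (key z < key m))
            = L'.filter (fun z => decide (key z < key m)) := by
          simp [h]
        rw [show pvRun key m (x :: L') = pvRun key m L' by simp [pvRun, h]]
        rw [hfil]
        exact ih L' m hL

lemma pvRun_eq (key : String → Int) (L : List String) (m : String) :
    pvRun key m L
    = match PySem.List.min? (L.filter (fun x => decide (key x < key m))) key with
      | none => m
      | some x => x :=
  pvRun_eq_aux key L.length L m le_rfl

-- the first min over the learnable names priced below c computes pvBest's name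
lemma min?_filter_eq_pvBest (recipePrices : List (String × Int)) (currentSkill : Int)
    (rs : List (String × List (String × Int))) :
    ∀ (c : Int),
      PySem.List.min?
        ((rs.filter (fun p =>
            (match p.2.lookup "Learn" with
             | some l => decide (l ≤ currentSkill)
             | none => false)
            && decide (pvPrice recipePrices p.1 < c))).map (fun p => p.1))
        (fun n => pvPrice recipePrices n)
      = (pvBest recipePrices currentSkill rs c).map Prod.snd := by
  induction rs with
  | nil => intro c; simp [pvBest, PySem.List.min?]
  | cons p rs ih =>
    intro c
    cases hl : p.2.lookup "Learn" with
    | none =>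
      simp only [pvBest, hl, List.filter_cons]
      simpa [hl] using ih c
    | some l =>
      by_cases h1 : l ≤ currentSkill
      · by_cases h2 : pvPrice recipePrices p.1 < c
        · have hfil : (p :: rs).filter (fun p =>
              (match p.2.lookup "Learn" with
               | some l => decide (l ≤ currentSkill)
               | none => false)
              && decide (pvPrice recipePrices p.1 < c))
            = p :: rs.filter (fun p =>
              (match p.2.lookup "Learn" with
               | some l => decide (l ≤ currentSkill)
               | none => false)
              && decide (pvPrice recipePrices p.1 < c)) := by
            simp [hl, h1, h2]
          rw [hfil, List.map_cons, min?_cons, pvRun_eq]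
          have hcomm :
              ((rs.filter (fun q =>
                  (match q.2.lookup "Learn" with
                   | some l => decide (l ≤ currentSkill)
                   | none => false)
                  && decide (pvPrice recipePrices q.1 < c))).map (fun q => q.1)).filter
                (fun z => decide (pvPrice recipePrices z < pvPrice recipePrices p.1))
              = (rs.filter (fun q =>
                  (match q.2.lookup "Learn" with
                   | some l => decide (l ≤ currentSkill)
                   | none => false)
                  && decide (pvPrice recipePrices q.1 < pvPrice recipePrices p.1))).map (fun q => q.1) := by
            rw [List.filter_map, List.filter_filter]
            congr 1
            apply List.filter_congr
            intro q _
            by_cases hq : pvPrice recipePrices q.1 < pvPrice recipePrices p.1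
            · simp [Function.comp, hq, lt_trans hq h2]
            · simp [Function.comp, hq]
          rw [hcomm, ih (pvPrice recipePrices p.1)]
          simp only [pvBest, hl, h1, h2, if_true]
          cases pvBest recipePrices currentSkill rs (pvPrice recipePrices p.1) <;> simp
        · have hfil : (p :: rs).filter (fun p =>
              (match p.2.lookup "Learn" with
               | some l => decide (l ≤ currentSkill)
               | none => false)
              && decide (pvPrice recipePrices p.1 < c))
            = rs.filter (fun p =>
              (match p.2.lookup "Learn" with
               | some l => decide (l ≤ currentSkill)
               | none => false)
              && decide (pvPrice recipePrices p.1 < c)) := by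
            simp [hl, h2]
          rw [hfil, ih c]
          simp [pvBest, hl, h1, h2]
      · have hfil : (p :: rs).filter (fun p =>
            (match p.2.lookup "Learn" with
             | some l => decide (l ≤ currentSkill)
             | none => false)
            && decide (pvPrice recipePrices p.1 < c))
          = rs.filter (fun p =>
            (match p.2.lookup "Learn" with
             | some l => decide (l ≤ currentSkill)
             | none => false)
            && decide (pvPrice recipePrices p.1 < c)) := by
          simp [hl, h1]
        rw [hfil, ih c]
        simp [pvBest, hl, h1]

-- the one-step state update of Python's running min / of insertion at the head
def pvMinStep (key : String → Int) (o : Option String) (x : String) : Option String :=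
  match o with
  | none => some x
  | some m => if key x < key m then some x else some m

lemma min?_eq_foldl (key : String → Int) (L : List String) :
    PySem.List.min? L key = L.foldl (pvMinStep key) none := by
  unfold PySem.List.min?
  congr 1
  funext o x
  cases o <;> simp [pvMinStep]

lemma head?_insertBy (key : String → Int) (x : String) (acc : List String) :
    (PySem.List.insertBy (fun a b => decide (key a < key b)) x acc).head? = pvMinStep key acc.head? x := by
  cases acc with
  | nil => simp [PySem.List.insertBy, pvMinStep]
  | cons h t =>
    by_cases hx : key x < key h <;> simp [PySem.List.insertBy, pvMinStep, hx]

lemma head?_foldl_insertBy (key : String → Int) :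
    ∀ (L : List String) (acc : List String),
      (L.foldl (fun acc x => PySem.List.insertBy (fun a b => decide (key a < key b)) x acc) acc).head?
      = L.foldl (pvMinStep key) acc.head? := by
  intro L
  induction L with
  | nil => intro acc; rfl
  | cons x L ih =>
    intro acc
    simp only [List.foldl_cons]
    rw [ih, head?_insertBy]

-- the head of the stable sort is Python's min (first minimal element)
lemma sorted_head? (key : String → Int) (L : List String) :
    (PySem.List.sorted L key).head? = PySem.List.min? L key := by
  rw [PySem.List.sorted_eq_foldl_insertBy, head?_foldl_insertBy, min?_eq_foldl]
  rfl

-- filtering by (key < c) does not change the running min once the state is below c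
lemma fold_filter_some (key : String → Int) (c : Int) :
    ∀ (L : List String) (m : String), key m < c →
      (L.filter (fun n => decide (key n < c))).foldl (pvMinStep key) (some m)
      = L.foldl (pvMinStep key) (some m) := by
  intro L
  induction L with
  | nil => intro m _; rfl
  | cons x L ih =>
    intro m hm
    by_cases hx : key x < c
    · simp only [List.filter_cons, hx, decide_true, if_true, List.foldl_cons]
      have hstep : pvMinStep key (some m) x = some (if key x < key m then x else m) := by
        simp only [pvMinStep]; split_ifs <;> rfl
      rw [hstep]
      have hlt : key (if key x < key m then x else m) < c := by split_ifs <;> assumption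
      exact ih _ hlt
    · have hge : ¬ key x < key m := by omega
      simp only [List.filter_cons, hx, decide_false, List.foldl_cons]
      have hstep : pvMinStep key (some m) x = some m := by simp [pvMinStep, hge]
      rw [hstep]
      exact ih m hm

lemma fold_filter_none (key : String → Int) (c : Int) :
    ∀ (L : List String) (x : String), c ≤ key x → (∃ y ∈ L, key y < c) →
      (L.filter (fun n => decide (key n < c))).foldl (pvMinStep key) none
      = L.foldl (pvMinStep key) (some x) := by
  intro L
  induction L with
  | nil => intro x _ h; simp at h
  | cons z L ih =>
    intro x hx hex
    by_cases hz : key z < c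
    · simp only [List.filter_cons, hz, decide_true, if_true, List.foldl_cons]
      have h1 : pvMinStep key none z = some z := rfl
      have h2 : pvMinStep key (some x) z = some z := by
        have : key z < key x := by omega
        simp [pvMinStep, this]
      rw [h1, h2]
      exact fold_filter_some key c L z hz
    · simp only [List.filter_cons, hz, decide_false, List.foldl_cons]
      obtain ⟨y, hy, hyc⟩ := hex
      have hyL : y ∈ L := by
        rcases List.mem_cons.mp hy with h | h
        · subst h; omega
        · exact h
      have h2 : pvMinStep key (some x) z = some (if key z < key x then z else x) := by
        simp only [pvMinStep]; split_ifs <;> rfl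
      rw [h2]
      have hge : c ≤ key (if key z < key x then z else x) := by split_ifs <;> omega
      exact ih _ hge ⟨y, hyL, hyc⟩

-- if some element lies below c, the first min over the (< c)-filtered list is the first min of the list
lemma min?_filter_of_exists (key : String → Int) (c : Int) (L : List String)
    (h : ∃ y ∈ L, key y < c) :
    PySem.List.min? (L.filter (fun n => decide (key n < c))) key = PySem.List.min? L key := by
  cases L with
  | nil => simp at h
  | cons z L =>
    rw [min?_eq_foldl, min?_eq_foldl]
    by_cases hz : key z < c
    · simp only [List.filter_cons, hz, decide_true, if_true, List.foldl_cons]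
      exact fold_filter_some key c L z hz
    · simp only [List.filter_cons, hz, decide_false, List.foldl_cons]
      obtain ⟨y, hy, hyc⟩ := h
      have hyL : y ∈ L := by
        rcases List.mem_cons.mp hy with h | h
        · subst h; omega
        · exact h
      exact fold_filter_none key c L z (by omega) ⟨y, hyL, hyc⟩

-- pushing the (price < c) part of A's combined filter outside the map
lemma filter_map_comm (recipePrices : List (String × Int)) (currentSkill : Int)
    (rs : List (String × List (String × Int))) (c : Int) :
    (rs.filter (fun p =>
        (match p.2.lookup "Learn" with
         | some l => decide (l ≤ currentSkill)
         | none => false)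
        && decide (pvPrice recipePrices p.1 < c))).map (fun p => p.1)
    = ((rs.filter (fun p =>
        match p.2.lookup "Learn" with
        | some l => decide (l ≤ currentSkill)
        | none => false)).map (fun p => p.1)).filter (fun n => decide (pvPrice recipePrices n < c)) := by
  rw [List.filter_map, List.filter_filter]
  congr 1
  apply List.filter_congr
  intro p _
  cases hl : p.2.lookup "Learn" <;> simp [Function.comp, Bool.and_comm]

-- ===== VERDICT (by name: the statement is the Claim_ definition above) =====
theorem getCheapestSkillingRecipe_spec : Claim_unchanged_getCheapestSkillingRecipe := by
  intro recipes recipePrices currentSkill _ _ hnD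
  unfold getCheapestSkillingRecipe getCheapestSkillingRecipe_alt
  rw [foldA_eq_pvBest]
  -- both sides as getD "" of a first min
  have hA : (match pvBest recipePrices currentSkill recipes 999999 with
      | none => ((999999 : Int), "")
      | some r => r).2
      = ((pvBest recipePrices currentSkill recipes 999999).map Prod.snd).getD "" := by
    cases pvBest recipePrices currentSkill recipes 999999 <;> rfl
  rw [hA, ← min?_filter_eq_pvBest, filter_map_comm]
  set L := (recipes.filter (fun p =>
      match p.2.lookup "Learn" with
      | some l => decide (l ≤ currentSkill)
      | none => false)).map (fun p => p.1) with hLdef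
  have hB : (match PySem.List.sorted L (fun n => pvPrice recipePrices n) with
      | [] => ""
      | x :: _ => x)
      = (PySem.List.min? L (fun n => pvPrice recipePrices n)).getD "" := by
    have hh := sorted_head? (fun n => pvPrice recipePrices n) L
    cases hs : PySem.List.sorted L (fun n => pvPrice recipePrices n) with
    | nil => rw [hs] at hh; simp at hh; rw [← hh]; rfl
    | cons x t => rw [hs] at hh; simp at hh; rw [← hh]; rfl
  rw [hB]
  -- case split on whether any learnable recipe exists / is priced below the sentinel
  by_cases hex : ∃ n ∈ L, pvPrice recipePrices n < 999999
  · rw [min?_filter_of_exists _ _ _ hex]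
  · -- no learnable recipe at all, or D_ would hold
    have hLnil : L = [] := by
      by_contra hne
      rcases List.exists_mem_of_ne_nil _ hne with ⟨n, hn⟩
      rw [hLdef] at hn
      rcases List.mem_map.mp hn with ⟨p, hpf, hpn⟩
      rcases List.mem_filter.mp hpf with ⟨hpmem, hpl⟩
      apply hnD
      constructor
      · refine ⟨p, hpmem, ?_⟩
        cases hl : p.2.lookup "Learn" with
        | none => rw [hl] at hpl; simp at hpl
        | some l => rw [hl] at hpl; simp at hpl; simpa [hl] using hpl
      · intro q hqmem hql
        by_contra hqp
        apply hex
        refine ⟨q.1, ?_, by omega⟩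
        rw [hLdef]
        refine List.mem_map.mpr ⟨q, List.mem_filter.mpr ⟨hqmem, ?_⟩, rfl⟩
        cases hl : q.2.lookup "Learn" with
        | none => rw [hl] at hql; simp only [Option.getD_none] at hql; omega
        | some l => rw [hl] at hql; simp at hql; simp [hql]
    rw [hLnil]
    rfl

theorem getCheapestSkillingRecipe_changed : Claim_changed_getCheapestSkillingRecipe := by
  unfold Claim_changed_getCheapestSkillingRecipe; decide

theorem getCheapestSkillingRecipe_tight : Claim_exact_getCheapestSkillingRecipe := by
  intro recipes recipePrices currentSkill _ hPre hD
  obtain ⟨hex, hall⟩ := hD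
  -- A returns "": every learnable recipe is priced at or above the sentinel
  have hfil : recipes.filter (fun p =>
      (match p.2.lookup "Learn" with
       | some l => decide (l ≤ currentSkill)
       | none => false)
      && decide (pvPrice recipePrices p.1 < 999999)) = [] := by
    apply List.filter_eq_nil_iff.mpr
    intro p hp
    cases hl : p.2.lookup "Learn" with
    | none => simp
    | some l =>
      by_cases h1 : l ≤ currentSkill
      · have := hall p hp (by simp [hl]; exact h1)
        simp [h1]; omega
      · simp [h1]
  have hbest : pvBest recipePrices currentSkill recipes 999999 = none := by
    have h := min?_filter_eq_pvBest recipePrices currentSkill recipes 999999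
    rw [hfil] at h
    simp [PySem.List.min?] at h
    exact h
  have hA : getCheapestSkillingRecipe recipes recipePrices currentSkill = "" := by
    unfold getCheapestSkillingRecipe
    rw [foldA_eq_pvBest, hbest]
  -- B returns a recipe name, and Pre_ says recipe names are nonempty
  rw [hA]
  set L := (recipes.filter (fun p =>
      match p.2.lookup "Learn" with
      | some l => decide (l ≤ currentSkill)
      | none => false)).map (fun p => p.1) with hLdef
  have hLne : L ≠ [] := by
    obtain ⟨p, hp, hlearn⟩ := hex
    have hpin : p.1 ∈ L := by
      rw [hLdef]
      refine List.mem_map.mpr ⟨p, List.mem_filter.mpr ⟨hp, ?_⟩, rfl⟩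
      cases hl : p.2.lookup "Learn" with
      | none => rw [hl] at hlearn; simp only [Option.getD_none] at hlearn; omega
      | some l => rw [hl] at hlearn; simp at hlearn; simp [hlearn]
    intro hnil
    rw [hnil] at hpin
    simp at hpin
  have hBval : getCheapestSkillingRecipe_alt recipes recipePrices currentSkill
      = match PySem.List.sorted L (fun n => pvPrice recipePrices n) with
        | [] => ""
        | x :: _ => x := rfl
  cases hs : PySem.List.sorted L (fun n => pvPrice recipePrices n) with
  | nil => exact absurd ((PySem.List.sorted_eq_nil_iff _ _ _).mp hs) hLne
  | cons x t =>
    intro hB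
    rw [hBval, hs] at hB
    have hxmem : x ∈ L := by
      have hxs : x ∈ PySem.List.sorted L (fun n => pvPrice recipePrices n) := by
        rw [hs]; exact List.mem_cons_self ..
      exact (PySem.List.mem_sorted _ _ _ _).mp hxs
    rw [hLdef] at hxmem
    obtain ⟨p, hpf, hpx⟩ := List.mem_map.mp hxmem
    have hne := (hPre.2.2 p (List.mem_filter.mp hpf).1).1
    rw [hpx] at hne
    exact hne hB.symm
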